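-- pv_equiv track=rewrite | github.com/Blockprod/AIPROD | packages/aiprod-pipelines/src/aiprod_pipelines/inference/kernel_fusion/adaptive_fusion.py | _estimate_memory_overhead
-- ===== SOURCE A (Python) =====
-- from typing import Dict, List, Optional, Tuple, Any
--
-- def _estimate_memory_overhead(fusions: List[str]) -> int:
--     """Estimate total memory overhead from fusions."""
--     # Fusions typically require some workspace memory
--     # Attention fusion: ~hidden_dim * batch * seq_len * 2 bytes (for scratch)
--     overhead = 0
--
--     # Base overhead per fusion (workspace/scratch memory)
--     for fusion in fusions:
--         if fusion == "attention_linear":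
--             overhead += 1024 * 1024  # 1MB per fusion
--         elif fusion == "conv_activation":
--             overhead += 512 * 1024   # 512KB
--         else:
--             overhead += 256 * 1024   # 256KB
--
--     return overhead
-- ===== SOURCE B (Python) =====
-- def _estimate_memory_overhead(fusions):
--     """Estimate total memory overhead from fusions."""
--     n_attn = fusions.count("attention_linear")
--     n_conv = fusions.count("conv_activation")
--     return n_attn * 1024 * 1024 + n_conv * 512 * 1024 + (len(fusions) - n_attn - n_conv) * 256 * 1024
-- ===== Notes on version B (the rewrite author's own statement) =====
-- stated objective: simpler
-- what changed: Replaces the per-element accumulating loop with two category counts (list.count) and one closed-form arithmetic expression.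
import Mathlib
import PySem

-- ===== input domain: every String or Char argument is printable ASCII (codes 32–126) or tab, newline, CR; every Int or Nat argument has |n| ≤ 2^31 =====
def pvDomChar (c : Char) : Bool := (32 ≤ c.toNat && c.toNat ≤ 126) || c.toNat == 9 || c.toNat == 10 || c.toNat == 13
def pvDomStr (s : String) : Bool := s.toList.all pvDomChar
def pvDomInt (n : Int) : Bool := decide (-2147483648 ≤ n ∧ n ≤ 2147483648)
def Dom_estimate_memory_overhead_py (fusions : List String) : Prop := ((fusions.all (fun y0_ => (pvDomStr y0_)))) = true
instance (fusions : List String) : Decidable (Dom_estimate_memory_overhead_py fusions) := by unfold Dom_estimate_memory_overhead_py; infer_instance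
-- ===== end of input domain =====

-- ===== PORT A =====
def estimate_memory_overhead_py (fusions : List String) : Int :=
  fusions.foldl (fun overhead fusion =>
    if fusion == "attention_linear" then overhead + 1024 * 1024
    else if fusion == "conv_activation" then overhead + 512 * 1024
    else overhead + 256 * 1024) 0

-- ===== PORT B =====
-- B: count each category once, then one closed-form arithmetic expression (simpler decomposition).
def estimate_memory_overhead_py_alt (fusions : List String) : Int :=
  let n_attn : Int := PySem.List.count fusions "attention_linear"
  let n_conv : Int := PySem.List.count fusions "conv_activation"
  n_attn * 1024 * 1024 + n_conv * 512 * 1024 + ((fusions.length : Int) - n_attn - n_conv) * 256 * 1024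

-- ===== PRECONDITION & SPEC =====
def Spec_estimate_memory_overhead_py (fusions : List String) (out : Int) : Prop := out = estimate_memory_overhead_py_alt fusions
instance (fusions : List String) (out : Int) : Decidable (Spec_estimate_memory_overhead_py fusions out) := by unfold Spec_estimate_memory_overhead_py; infer_instance

-- ===== CLAIM (what is proved, stated in full; the proofs are below) =====
def Claim_equal_estimate_memory_overhead_py : Prop := ∀ (fusions : List String), Dom_estimate_memory_overhead_py fusions → Spec_estimate_memory_overhead_py fusions (estimate_memory_overhead_py fusions)

-- ===== LEMMAS AND PROOFS =====

-- ===== VERDICT (by name: the statement is the Claim_ definition above) =====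
lemma overhead_foldl_shift (fusions : List String) (c : Int) :
    fusions.foldl (fun overhead fusion =>
      if fusion == "attention_linear" then overhead + 1024 * 1024
      else if fusion == "conv_activation" then overhead + 512 * 1024
      else overhead + 256 * 1024) c
    = c + fusions.foldl (fun overhead fusion =>
      if fusion == "attention_linear" then overhead + 1024 * 1024
      else if fusion == "conv_activation" then overhead + 512 * 1024
      else overhead + 256 * 1024) 0 := by
  induction fusions generalizing c with
  | nil => simp
  | cons h t ih =>
    simp only [List.foldl_cons]
    rw [ih, ih (if h == "attention_linear" then _ else _)]
    split_ifs <;> ring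

lemma overhead_eq (fusions : List String) :
    estimate_memory_overhead_py fusions = estimate_memory_overhead_py_alt fusions := by
  unfold estimate_memory_overhead_py estimate_memory_overhead_py_alt
  induction fusions with
  | nil => simp [PySem.List.count]
  | cons h t ih =>
    simp only [List.foldl_cons]
    rw [overhead_foldl_shift]
    by_cases h1 : h = "attention_linear"
    · simp [PySem.List.count, List.count_cons, h1] at *; push_cast at ih ⊢; linear_combination ih
    · by_cases h2 : h = "conv_activation"
      · simp [PySem.List.count, List.count_cons, h1, h2] at *; push_cast at ih ⊢; linear_combination ih
      · simp [PySem.List.count, List.count_cons, h1, h2] at *; push_cast at ih ⊢; linear_combination ih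


theorem estimate_memory_overhead_py_spec : Claim_equal_estimate_memory_overhead_py := by
  intro fusions _
  exact overhead_eq fusions
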